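-- pv_equiv track=rewrite | github.com/TiffyEnglish/Exec-Status | scripts/_sync_in_dev_from_jira_export.py | reorder_issues_by_group_then_rank
-- ===== SOURCE A (Python) =====
-- NCW_GROUP = {
--     "NCW-80190": "Other",
--     "NCW-87721": "Other",
--     "NCW-87941": "Trackers",
--     "NCW-88017": "Trackers",
--     "NCW-88025": "Trackers",
--     "NCW-87867": "Device Integration",
--     "NCW-88080": "Device Integration",
--     "NCW-87242": "Trackers",
--     "NCW-87802": "Device Integration",
--     "NCW-87239": "Live AI Features",
-- }
--
-- GROUP_RENDER_ORDER = [
--     "Trackers",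
--     "Device Integration",
--     "Ops",
--     "Other",
-- ]
--
-- def reorder_issues_by_group_then_rank(
--     issues: list[dict], rank_lookup: dict[str, int]
-- ) -> list[dict]:
--     buckets: dict[str, list[dict]] = {g: [] for g in GROUP_RENDER_ORDER}
--     extra_buckets: dict[str, list[dict]] = {}
--     for i in issues:
--         key = i["key"]
--         g = project_group_for_key(key)
--         target = buckets if g in buckets else extra_buckets
--         if g not in target:
--             target[g] = []
--         target[g].append(i)
--
--     ordered: list[dict] = []
--     for g in GROUP_RENDER_ORDER:
--         grp = buckets.get(g) or []
--         grp.sort(key=lambda iss: rank_lookup.get(iss["key"], 999))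
--         ordered.extend(grp)
--     for g in sorted(extra_buckets.keys()):
--         grp = extra_buckets[g]
--         grp.sort(key=lambda iss: rank_lookup.get(iss["key"], 999))
--         ordered.extend(grp)
--     return ordered
--
-- def project_group_for_key(key: str) -> str:
--     if key.startswith("CWHO"):
--         return "Ops"
--     if key.startswith("SHC"):
--         return "Device Integration"
--     if key in NCW_GROUP:
--         return NCW_GROUP[key]
--     if key.startswith("NCW"):
--         return "Trackers"
--     return "Other"
-- ===== SOURCE B (Python) =====
-- SPECIAL_NCW = {
--     "NCW-80190": "Other",
--     "NCW-87721": "Other",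
--     "NCW-87941": "Trackers",
--     "NCW-88017": "Trackers",
--     "NCW-88025": "Trackers",
--     "NCW-87867": "Device Integration",
--     "NCW-88080": "Device Integration",
--     "NCW-87242": "Trackers",
--     "NCW-87802": "Device Integration",
--     "NCW-87239": "Live AI Features",
-- }
--
-- GROUP_SEQUENCE = [
--     "Trackers",
--     "Device Integration",
--     "Ops",
--     "Other",
-- ]
--
-- PREFIX_RULES = [
--     ("CWHO", "Ops"),
--     ("SHC", "Device Integration"),
--     ("NCW", "Trackers"),
-- ]
--
--
-- def group_of(key: str) -> str:
--     # Table-driven grouping: explicit overrides first (no override key carries a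
--     # prefix of another rule), then the prefix rules in order, then the default.
--     special = SPECIAL_NCW.get(key)
--     if special is not None:
--         return special
--     for prefix, grp in PREFIX_RULES:
--         if key.startswith(prefix):
--             return grp
--     return "Other"
--
--
-- def reorder_issues_by_group_then_rank(
--     issues: list[dict], rank_lookup: dict[str, int]
-- ) -> list[dict]:
--     # Group-scan instead of bucketing: walk the render sequence (known groups,
--     # then the extra groups seen, alphabetically) and emit each group's issues
--     # sorted by rank. No bucket dicts are built.
--     def rank_of(issue: dict) -> int:
--         return rank_lookup.get(issue["key"], 999)
--
--     extras = sorted({g for g in map(lambda issue: group_of(issue["key"]), issues)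
--                      if g not in GROUP_SEQUENCE})
--     ordered: list[dict] = []
--     for grp in GROUP_SEQUENCE + extras:
--         members = [issue for issue in issues if group_of(issue["key"]) == grp]
--         ordered.extend(sorted(members, key=rank_of))
--     return ordered
-- ===== Notes on version B (the rewrite author's own statement) =====
-- stated objective: simpler
-- what changed: Replaced the bucket-dicts-then-sort-each-bucket pipeline with a group-scan: compute the render sequence (known groups, then extra groups alphabetically) and emit each group's issues sorted by rank by filtering the input list per group; the grouping helper is rewritten table-driven (override dict first, then an ordered prefix-rule table).
import Mathlib
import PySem

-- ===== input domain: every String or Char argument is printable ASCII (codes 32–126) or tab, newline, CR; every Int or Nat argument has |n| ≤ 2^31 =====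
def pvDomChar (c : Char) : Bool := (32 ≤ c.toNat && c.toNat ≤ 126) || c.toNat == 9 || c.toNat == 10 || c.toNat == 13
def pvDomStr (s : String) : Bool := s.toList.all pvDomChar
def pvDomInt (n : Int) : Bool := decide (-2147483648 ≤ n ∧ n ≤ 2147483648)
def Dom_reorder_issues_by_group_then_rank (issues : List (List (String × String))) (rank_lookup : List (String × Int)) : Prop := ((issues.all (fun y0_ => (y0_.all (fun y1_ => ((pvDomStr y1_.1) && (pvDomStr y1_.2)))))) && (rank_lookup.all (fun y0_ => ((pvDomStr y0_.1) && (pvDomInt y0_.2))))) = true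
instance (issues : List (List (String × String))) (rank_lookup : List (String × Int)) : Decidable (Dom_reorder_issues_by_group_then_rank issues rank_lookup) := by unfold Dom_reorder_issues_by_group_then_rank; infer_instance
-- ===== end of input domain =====

-- B replaces A's bucket-dicts-then-sort-each-bucket pipeline with a group-scan (emit each group
-- of the render sequence in turn, filtering the input per group) and a table-driven grouping
-- helper; objective: simpler. Equivalence is about the return value (A sorts only its own fresh
-- bucket lists in place; the arguments are not mutated).

-- ===== PORT A =====
-- same-module constants/helpers of A
def NCW_GROUP : PySem.Dict String String := PySem.Dict.ofList [
  ("NCW-80190", "Other"), ("NCW-87721", "Other"), ("NCW-87941", "Trackers"),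
  ("NCW-88017", "Trackers"), ("NCW-88025", "Trackers"), ("NCW-87867", "Device Integration"),
  ("NCW-88080", "Device Integration"), ("NCW-87242", "Trackers"),
  ("NCW-87802", "Device Integration"), ("NCW-87239", "Live AI Features")]

def GROUP_RENDER_ORDER : List String := ["Trackers", "Device Integration", "Ops", "Other"]

def project_group_for_key (key : String) : String :=
  if PySem.Str.startswith key "CWHO" then "Ops"
  else if PySem.Str.startswith key "SHC" then "Device Integration"
  else match NCW_GROUP.get? key with          -- 'if key in NCW_GROUP: return NCW_GROUP[key]'
  | some g => g
  | none => if PySem.Str.startswith key "NCW" then "Trackers" else "Other"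

-- i["key"]: none = KeyError, excluded by Pre_ (both Pythons raise there)
def pvIssueKey (i : List (String × String)) : String :=
  match (PySem.Dict.mk i).get? "key" with
  | some s => s
  | none => ""

def pvGrp (i : List (String × String)) : String := project_group_for_key (pvIssueKey i)

-- the sort key 'lambda iss: rank_lookup.get(iss["key"], 999)'
def pvRankKey (rank_lookup : List (String × Int)) (iss : List (String × String)) : Int :=
  (PySem.Dict.mk rank_lookup).getD (pvIssueKey iss) 999

-- body of A's bucketing loop: state = (buckets, extra_buckets); 'target = buckets if g in buckets else extra_buckets'
def pvStepA (st : PySem.Dict String (List (List (String × String))) × PySem.Dict String (List (List (String × String))))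
    (i : List (String × String)) :
    PySem.Dict String (List (List (String × String))) × PySem.Dict String (List (List (String × String))) :=
  let g := pvGrp i
  if st.1.contains g then
    let t := if st.1.contains g then st.1 else st.1.insert g []   -- 'if g not in target: target[g] = []'
    (t.modify g [] (fun l => l ++ [i]), st.2)                     -- 'target[g].append(i)'
  else
    let t := if st.2.contains g then st.2 else st.2.insert g []
    (st.1, t.modify g [] (fun l => l ++ [i]))

def reorder_issues_by_group_then_rank (issues : List (List (String × String))) (rank_lookup : List (String × Int)) : List (List (String × String)) :=
  let buckets0 := GROUP_RENDER_ORDER.foldl (fun d g => d.insert g []) PySem.Dict.empty  -- {g: [] for g in GROUP_RENDER_ORDER}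
  let st := issues.foldl pvStepA (buckets0, PySem.Dict.empty)
  let ordered := GROUP_RENDER_ORDER.foldl (fun acc g =>
    acc ++ PySem.List.sorted (st.1.getD g []) (pvRankKey rank_lookup)) []   -- 'buckets.get(g) or []' = getD g [] (values are lists; empty is falsy)
  (PySem.List.sorted st.2.keys (fun g => g)).foldl (fun acc g =>
    acc ++ PySem.List.sorted (st.2.getD g []) (pvRankKey rank_lookup)) ordered

-- ===== PORT B =====
-- B-side module constants (Source B is standalone: its own tables, restructured)
def SPECIAL_NCW : PySem.Dict String String := PySem.Dict.ofList [
  ("NCW-80190", "Other"), ("NCW-87721", "Other"), ("NCW-87941", "Trackers"),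
  ("NCW-88017", "Trackers"), ("NCW-88025", "Trackers"), ("NCW-87867", "Device Integration"),
  ("NCW-88080", "Device Integration"), ("NCW-87242", "Trackers"),
  ("NCW-87802", "Device Integration"), ("NCW-87239", "Live AI Features")]

def GROUP_SEQUENCE : List String := ["Trackers", "Device Integration", "Ops", "Other"]

def PREFIX_RULES : List (String × String) :=
  [("CWHO", "Ops"), ("SHC", "Device Integration"), ("NCW", "Trackers")]

-- table-driven grouping: override dict first, then the prefix-rule table in order
def group_of (key : String) : String :=
  match SPECIAL_NCW.get? key with
  | some special => special
  | none =>
    match PREFIX_RULES.find? (fun rule => PySem.Str.startswith key rule.1) with  -- 'for prefix, grp in PREFIX_RULES: if key.startswith(prefix): return grp'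
    | some rule => rule.2
    | none => "Other"

def pvIssueGroup (issue : List (String × String)) : String :=
  group_of (((PySem.Dict.mk issue).get? "key").getD "")     -- issue["key"]: KeyError excluded by Pre_

def pvRankOf (table : List (String × Int)) (issue : List (String × String)) : Int :=
  (PySem.Dict.mk table).getD (((PySem.Dict.mk issue).get? "key").getD "") 999

def reorder_issues_by_group_then_rank_alt (issues : List (List (String × String))) (rank_lookup : List (String × Int)) : List (List (String × String)) :=
  let extras := PySem.List.sorted
    (PySem.Set.ofList ((issues.map pvIssueGroup).filter (fun grp => !(GROUP_SEQUENCE.contains grp))))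
    (fun grp => grp)
  (GROUP_SEQUENCE ++ extras).foldl (fun ordered grp =>
    ordered ++ PySem.List.sorted (issues.filter (fun issue => pvIssueGroup issue == grp))
      (pvRankOf rank_lookup)) []

-- ===== PRECONDITION & SPEC =====
-- Pre_ excludes exactly the inputs where the Python A raises KeyError: an issue dict without a "key" entry.
def Pre_reorder_issues_by_group_then_rank (issues : List (List (String × String))) (rank_lookup : List (String × Int)) : Prop :=
  ∀ i ∈ issues, (PySem.Dict.mk i).contains "key" = true
instance (issues : List (List (String × String))) (rank_lookup : List (String × Int)) : Decidable (Pre_reorder_issues_by_group_then_rank issues rank_lookup) := by unfold Pre_reorder_issues_by_group_then_rank; infer_instance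

def pvWitness_reorder_issues_by_group_then_rank : (List (List (String × String))) × (List (String × Int)) :=
  ([[("key", "NCW-87239")], [("key", "CWHO-3"), ("summary", "x")], [("key", "ZZZ-1")]], [("NCW-87239", 5)])

def Spec_reorder_issues_by_group_then_rank (issues : List (List (String × String))) (rank_lookup : List (String × Int)) (out : List (List (String × String))) : Prop := out = reorder_issues_by_group_then_rank_alt issues rank_lookup
instance (issues : List (List (String × String))) (rank_lookup : List (String × Int)) (out : List (List (String × String))) : Decidable (Spec_reorder_issues_by_group_then_rank issues rank_lookup out) := by unfold Spec_reorder_issues_by_group_then_rank; infer_instance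

-- ===== CLAIM (what is proved, stated in full; the proofs are below) =====
def Claim_equal_reorder_issues_by_group_then_rank : Prop := ∀ (issues : List (List (String × String))) (rank_lookup : List (String × Int)), Dom_reorder_issues_by_group_then_rank issues rank_lookup → Pre_reorder_issues_by_group_then_rank issues rank_lookup → Spec_reorder_issues_by_group_then_rank issues rank_lookup (reorder_issues_by_group_then_rank issues rank_lookup)

-- ===== LEMMAS AND PROOFS =====

-- proof-side abbreviations
def pvExtra (issues : List (List (String × String))) : List String :=
  PySem.List.sorted
    (PySem.Set.ofList ((issues.map pvGrp).filter (fun g => !GROUP_RENDER_ORDER.contains g)))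
    (fun g => g)

def pvStep1 (d : PySem.Dict String (List (List (String × String)))) (i : List (String × String)) :
    PySem.Dict String (List (List (String × String))) :=
  d.modify (pvGrp i) [] (fun l => l ++ [i])

def pvStep2 (d : PySem.Dict String (List (List (String × String)))) (i : List (String × String)) :
    PySem.Dict String (List (List (String × String))) :=
  (if d.contains (pvGrp i) then d else d.insert (pvGrp i) []).modify (pvGrp i) [] (fun l => l ++ [i])

-- ---- the two grouping helpers agree ----

theorem pv_not_both_prefix (key p q : String)
    (hne : ¬ (p.toList <+: q.toList) ∧ ¬ (q.toList <+: p.toList))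
    (hp : PySem.Str.startswith key p = true) :
    PySem.Str.startswith key q = false := by
  by_contra h
  have hq : PySem.Str.startswith key q = true := by
    cases hqq : PySem.Str.startswith key q
    · exact absurd hqq h
    · rfl
  rw [PySem.Str.startswith_eq, PySem.Chars.startswith_iff] at hp hq
  rcases List.prefix_or_prefix_of_prefix hp hq with hc | hc
  · exact hne.1 hc
  · exact hne.2 hc

theorem pv_special_startswith (key : String) (g : String)
    (h : SPECIAL_NCW.get? key = some g) :
    PySem.Str.startswith key "NCW" = true := by
  have hc : SPECIAL_NCW.contains key = true := by
    rw [PySem.Dict.contains_eq_isSome_get?, h]; rfl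
  have hm : key ∈ SPECIAL_NCW.keys := (PySem.Dict.contains_iff_mem_keys _ _).mp hc
  have hall : ∀ k ∈ SPECIAL_NCW.keys, PySem.Str.startswith k "NCW" = true := by decide
  exact hall key hm

theorem pv_group_of_eq (key : String) : group_of key = project_group_for_key key := by
  unfold group_of project_group_for_key
  have hNG : NCW_GROUP = SPECIAL_NCW := rfl
  rw [hNG]
  cases hg : SPECIAL_NCW.get? key with
  | some g =>
    have hn := pv_special_startswith key g hg
    have hcwho : PySem.Str.startswith key "CWHO" = false :=
      pv_not_both_prefix key "NCW" "CWHO" (by decide) hn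
    have hshc : PySem.Str.startswith key "SHC" = false :=
      pv_not_both_prefix key "NCW" "SHC" (by decide) hn
    simp at hcwho hshc
    simp [hcwho, hshc]
  | none =>
    by_cases hc : PySem.Str.startswith key "CWHO" = true
    all_goals by_cases hs : PySem.Str.startswith key "SHC" = true
    all_goals by_cases hw : PySem.Str.startswith key "NCW" = true
    all_goals simp at hc hs hw
    all_goals simp [PREFIX_RULES, List.find?, hc, hs, hw]

theorem pv_issueGroup_eq : pvIssueGroup = pvGrp := by
  funext i
  unfold pvIssueGroup pvGrp pvIssueKey
  rw [pv_group_of_eq]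
  cases h : (PySem.Dict.mk i).get? "key" <;> rfl

theorem pv_rankOf_eq (rank_lookup : List (String × Int)) :
    pvRankOf rank_lookup = pvRankKey rank_lookup := by
  funext i
  unfold pvRankOf pvRankKey pvIssueKey
  cases h : (PySem.Dict.mk i).get? "key" <;> rfl

-- ---- A's loops ----

theorem pv_getD_fold (step : PySem.Dict String (List (List (String × String))) → List (String × String) → PySem.Dict String (List (List (String × String))))
    (hstep : ∀ d i g, (step d i).getD g [] = if pvGrp i = g then d.getD g [] ++ [i] else d.getD g [])
    (l : List (List (String × String))) (d : PySem.Dict String (List (List (String × String)))) (g : String) :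
    (l.foldl step d).getD g [] = d.getD g [] ++ l.filter (fun i => decide (pvGrp i = g)) := by
  induction l generalizing d with
  | nil => simp
  | cons i l ih =>
    rw [List.foldl_cons, ih, hstep]
    by_cases h : pvGrp i = g
    · simp [h]
    · simp [h]

theorem pv_step1_getD (d : PySem.Dict String (List (List (String × String)))) (i : List (String × String)) (g : String) :
    (pvStep1 d i).getD g [] = if pvGrp i = g then d.getD g [] ++ [i] else d.getD g [] := by
  unfold pvStep1
  rw [PySem.Dict.getD_modify]
  by_cases h : pvGrp i = g
  · simp [h]
  · simp [h, Ne.symm h]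

theorem pv_step2_getD (d : PySem.Dict String (List (List (String × String)))) (i : List (String × String)) (g : String) :
    (pvStep2 d i).getD g [] = if pvGrp i = g then d.getD g [] ++ [i] else d.getD g [] := by
  unfold pvStep2
  by_cases hc : d.contains (pvGrp i) = true
  · rw [if_pos hc, PySem.Dict.getD_modify]
    by_cases h : pvGrp i = g
    · simp [h]
    · simp [h, Ne.symm h]
  · rw [if_neg hc, PySem.Dict.getD_modify]
    by_cases h : pvGrp i = g
    · subst h
      rw [if_pos rfl, PySem.Dict.getD_insert_self,
        PySem.Dict.getD_of_not_contains d _ (by simpa using hc)]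
      simp
    · rw [if_neg (Ne.symm h), PySem.Dict.getD_insert_of_ne _ _ _ (Ne.symm h)]
      simp [h]

theorem pv_step1_keys (d : PySem.Dict String (List (List (String × String)))) (i : List (String × String))
    (h : pvGrp i ∈ d.keys) :
    (pvStep1 d i).keys = d.keys := by
  unfold pvStep1
  rw [PySem.Dict.keys_modify, PySem.Dict.keys_insert_of_contains _ _
    ((PySem.Dict.contains_iff_mem_keys _ _).mpr h)]

theorem pv_step2_keys (d : PySem.Dict String (List (List (String × String)))) (i : List (String × String)) :
    (pvStep2 d i).keys = PySem.Set.add d.keys (pvGrp i) := by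
  unfold pvStep2
  rw [PySem.Set.add_eq_ite]
  by_cases hc : d.contains (pvGrp i) = true
  · rw [if_pos hc, PySem.Dict.keys_modify, PySem.Dict.keys_insert_of_contains _ _ hc,
      if_pos ((PySem.Dict.contains_iff_mem_keys _ _).mp hc)]
  · rw [if_neg hc, PySem.Dict.keys_modify,
      PySem.Dict.keys_insert_of_contains _ _ (PySem.Dict.contains_insert_self _ _ _),
      PySem.Dict.keys_insert_of_not_contains _ _ (by simpa using hc),
      if_neg (fun hm => hc ((PySem.Dict.contains_iff_mem_keys _ _).mpr hm))]

theorem pv_keys_fold_step2 (l : List (List (String × String))) (d : PySem.Dict String (List (List (String × String)))) :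
    (l.foldl pvStep2 d).keys = PySem.Set.update d.keys (l.map pvGrp) := by
  induction l generalizing d with
  | nil => simp [PySem.Set.update]
  | cons i l ih =>
    rw [List.foldl_cons, ih, pv_step2_keys, List.map_cons, PySem.Set.update_cons]

theorem pv_loop_split (l : List (List (String × String)))
    (d1 d2 : PySem.Dict String (List (List (String × String))))
    (h1 : d1.keys = GROUP_RENDER_ORDER) :
    l.foldl pvStepA (d1, d2) =
      ((l.filter (fun i => GROUP_RENDER_ORDER.contains (pvGrp i))).foldl pvStep1 d1,
       (l.filter (fun i => !GROUP_RENDER_ORDER.contains (pvGrp i))).foldl pvStep2 d2) := by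
  induction l generalizing d1 d2 with
  | nil => simp
  | cons i l ih =>
    have hc1 : d1.contains (pvGrp i) = GROUP_RENDER_ORDER.contains (pvGrp i) := by
      rw [PySem.Dict.contains_eq_decide_mem_keys, h1]
      simp
    by_cases hm : pvGrp i ∈ GROUP_RENDER_ORDER
    · have hct : GROUP_RENDER_ORDER.contains (pvGrp i) = true := by
        simpa using hm
      have hstep : pvStepA (d1, d2) i = (pvStep1 d1 i, d2) := by
        simp only [pvStepA, pvStep1, hc1, hct, if_pos]
      rw [List.foldl_cons, hstep, List.filter_cons, List.filter_cons, hct]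
      simp only [Bool.not_true, Bool.false_eq_true, if_false, if_pos, List.foldl_cons]
      exact ih (pvStep1 d1 i) d2 (by rw [pv_step1_keys _ _ (by rw [h1]; exact hm)]; exact h1)
    · have hcf : GROUP_RENDER_ORDER.contains (pvGrp i) = false := by
        simpa using hm
      have hstep : pvStepA (d1, d2) i = (d1, pvStep2 d2 i) := by
        simp only [pvStepA, pvStep2, hc1, hcf, Bool.false_eq_true, if_false]
      rw [List.foldl_cons, hstep, List.filter_cons, List.filter_cons, hcf]
      simp only [Bool.not_false, Bool.false_eq_true, if_false, if_pos, List.foldl_cons]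
      exact ih d1 (pvStep2 d2 i) h1

-- ---- characterizations ----

theorem pv_filter_merge (issues : List (List (String × String))) (p : String → Bool) (g : String)
    (hg : p g = true) :
    (issues.filter (fun i => p (pvGrp i))).filter (fun i => decide (pvGrp i = g)) =
      issues.filter (fun i => decide (pvGrp i = g)) := by
  rw [List.filter_filter]
  apply List.filter_congr
  intro i _
  by_cases h : pvGrp i = g
  · simp [h, hg]
  · simp [h]

theorem pv_A_eq_canonical (issues : List (List (String × String))) (rank_lookup : List (String × Int)) :
    reorder_issues_by_group_then_rank issues rank_lookup =
      (GROUP_RENDER_ORDER ++ pvExtra issues).flatMap (fun g =>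
        PySem.List.sorted (issues.filter (fun i => decide (pvGrp i = g))) (pvRankKey rank_lookup)) := by
  unfold reorder_issues_by_group_then_rank
  simp only []
  have hb0keys : (GROUP_RENDER_ORDER.foldl (fun d g => d.insert g ([] : List (List (String × String)))) PySem.Dict.empty).keys = GROUP_RENDER_ORDER := rfl
  rw [pv_loop_split issues _ _ hb0keys]
  set d1 := (issues.filter (fun i => GROUP_RENDER_ORDER.contains (pvGrp i))).foldl pvStep1
      (GROUP_RENDER_ORDER.foldl (fun d g => d.insert g ([] : List (List (String × String)))) PySem.Dict.empty) with hd1def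
  set d2 := (issues.filter (fun i => !GROUP_RENDER_ORDER.contains (pvGrp i))).foldl pvStep2 PySem.Dict.empty with hd2def
  have hb0 : ∀ g, (GROUP_RENDER_ORDER.foldl (fun d g => d.insert g ([] : List (List (String × String)))) PySem.Dict.empty).getD g [] = [] := by
    intro g
    simp [GROUP_RENDER_ORDER, List.foldl, PySem.Dict.getD_insert, PySem.Dict.getD_empty]
  have hget1 : ∀ g, g ∈ GROUP_RENDER_ORDER →
      d1.getD g [] = issues.filter (fun i => decide (pvGrp i = g)) := by
    intro g hg
    rw [hd1def, pv_getD_fold pvStep1 pv_step1_getD, hb0,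
      pv_filter_merge issues (fun g => GROUP_RENDER_ORDER.contains g) g (by simpa [List.contains_iff_mem] using hg)]
    simp
  have hkeys2 : d2.keys = PySem.Set.ofList ((issues.map pvGrp).filter (fun g => !GROUP_RENDER_ORDER.contains g)) := by
    rw [hd2def, pv_keys_fold_step2]
    have hmf : (issues.filter (fun i => !GROUP_RENDER_ORDER.contains (pvGrp i))).map pvGrp =
        (issues.map pvGrp).filter (fun g => !GROUP_RENDER_ORDER.contains g) :=
      (List.filter_map (p := fun g => !GROUP_RENDER_ORDER.contains g) (f := pvGrp) (l := issues)).symm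
    rw [hmf, show (PySem.Dict.empty : PySem.Dict String (List (List (String × String)))).keys = [] from rfl,
      PySem.Set.update_nil_left]
  have hget2 : ∀ g, g ∈ PySem.List.sorted d2.keys (fun g => g) →
      d2.getD g [] = issues.filter (fun i => decide (pvGrp i = g)) := by
    intro g hg
    have hgn : (!GROUP_RENDER_ORDER.contains g) = true := by
      rw [hkeys2] at hg
      have hm := (PySem.Set.mem_ofList _ _).mp ((PySem.List.mem_sorted _ _ _ _).mp hg)
      exact (List.mem_filter.mp hm).2
    rw [hd2def, pv_getD_fold pvStep2 pv_step2_getD, PySem.Dict.getD_empty,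
      pv_filter_merge issues (fun g => !GROUP_RENDER_ORDER.contains g) g hgn]
    simp
  have hinner : GROUP_RENDER_ORDER.foldl
      (fun acc g => acc ++ PySem.List.sorted (d1.getD g []) (pvRankKey rank_lookup)) [] =
      GROUP_RENDER_ORDER.foldl
      (fun acc g => acc ++ PySem.List.sorted (issues.filter (fun i => decide (pvGrp i = g))) (pvRankKey rank_lookup)) [] :=
    PySem.List.foldl_congr_mem _ _ _ _ (fun acc g hg => by rw [hget1 g hg])
  have houter : ∀ init : List (List (String × String)), (PySem.List.sorted d2.keys (fun g => g)).foldl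
      (fun acc g => acc ++ PySem.List.sorted (d2.getD g []) (pvRankKey rank_lookup)) init =
      (PySem.List.sorted d2.keys (fun g => g)).foldl
      (fun acc g => acc ++ PySem.List.sorted (issues.filter (fun i => decide (pvGrp i = g))) (pvRankKey rank_lookup)) init :=
    fun init => PySem.List.foldl_congr_mem _ _ _ init (fun acc g hg => by rw [hget2 g hg])
  rw [hinner, houter]
  rw [PySem.List.foldl_append_eq_flatMap, PySem.List.foldl_append_eq_flatMap]
  have hext : PySem.List.sorted d2.keys (fun g => g) = pvExtra issues := by
    rw [hkeys2]; rfl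
  rw [hext]
  simp only [List.nil_append]
  rw [← List.flatMap_append]

theorem pv_B_eq_canonical (issues : List (List (String × String))) (rank_lookup : List (String × Int)) :
    reorder_issues_by_group_then_rank_alt issues rank_lookup =
      (GROUP_RENDER_ORDER ++ pvExtra issues).flatMap (fun g =>
        PySem.List.sorted (issues.filter (fun i => decide (pvGrp i = g))) (pvRankKey rank_lookup)) := by
  unfold reorder_issues_by_group_then_rank_alt
  have hGS : GROUP_SEQUENCE = GROUP_RENDER_ORDER := rfl
  simp only [hGS, pv_issueGroup_eq, pv_rankOf_eq]
  have hfe : ∀ g : String, (fun issue => pvGrp issue == g) = (fun i => decide (pvGrp i = g)) := by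
    intro g; funext i
    by_cases h : pvGrp i = g
    · simp [h]
    · simp [h]
  rw [show (fun ordered grp =>
        ordered ++ PySem.List.sorted (issues.filter (fun issue => pvGrp issue == grp)) (pvRankKey rank_lookup)) =
      (fun ordered grp =>
        ordered ++ PySem.List.sorted (issues.filter (fun i => decide (pvGrp i = grp))) (pvRankKey rank_lookup))
    from by funext ordered grp; rw [hfe grp]]
  rw [PySem.List.foldl_append_eq_flatMap]
  rfl

-- ===== VERDICT (by name: the statement is the Claim_ definition above) =====
theorem reorder_issues_by_group_then_rank_spec : Claim_equal_reorder_issues_by_group_then_rank := by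
  intro issues rank_lookup _ _
  unfold Spec_reorder_issues_by_group_then_rank
  rw [pv_A_eq_canonical, pv_B_eq_canonical]
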